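-- pv_equiv track=rewrite | github.com/jflucier/Marechal_pipelines | depmap/expression_filtering.py | find_full_column_name
-- ===== SOURCE A (Python) =====
-- def find_full_column_name(short_name, columns):
--     """
--     Matches a gene symbol (e.g., 'BRCA1') to various DepMap column formats
--     (e.g., 'BRCA1 (672)' or 'BRCA1 (ENSG...)').
--     """
--     if short_name in columns:
--         return short_name
--
--     # Try finding symbol + Entrez ID (91607) format
--     matches_entrez = [c for c in columns if c.startswith(f"{short_name} (") and not '(ENSG' in c]
--     if matches_entrez:
--         return matches_entrez[0]
--
--     # Try finding symbol + Ensembl ID (ENSG...) format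
--     matches_ensg = [c for c in columns if c.startswith(f"{short_name} (ENSG")]
--     if matches_ensg:
--         return matches_ensg[0]
--
--     return None
-- ===== SOURCE B (Python) =====
-- def find_full_column_name(short_name, columns):
--     # Single pass: record exact hit and the first Entrez/Ensembl-style matches,
--     # then resolve priority after the loop.
--     pref = short_name + " ("
--     pref_ensg = short_name + " (ENSG"
--     exact = False
--     first_entrez = None
--     first_ensg = None
--     for c in columns:
--         if c == short_name:
--             exact = True
--         if first_entrez is None and c.startswith(pref) and '(ENSG' not in c:
--             first_entrez = c
--         if first_ensg is None and c.startswith(pref_ensg):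
--             first_ensg = c
--     if exact:
--         return short_name
--     if first_entrez is not None:
--         return first_entrez
--     return first_ensg
-- ===== Notes on version B (the rewrite author's own statement) =====
-- stated objective: faster
-- what changed: Replaced A's membership test plus two separate list-comprehension filter passes by a single loop over columns that tracks the exact hit and the first Entrez-style and first Ensembl-style matches, resolving the priority after the loop; once a first match is recorded the is-None guard short-circuits, so the expensive startswith/substring tests stop being run, whereas A's comprehensions test every column.
import Mathlib
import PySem

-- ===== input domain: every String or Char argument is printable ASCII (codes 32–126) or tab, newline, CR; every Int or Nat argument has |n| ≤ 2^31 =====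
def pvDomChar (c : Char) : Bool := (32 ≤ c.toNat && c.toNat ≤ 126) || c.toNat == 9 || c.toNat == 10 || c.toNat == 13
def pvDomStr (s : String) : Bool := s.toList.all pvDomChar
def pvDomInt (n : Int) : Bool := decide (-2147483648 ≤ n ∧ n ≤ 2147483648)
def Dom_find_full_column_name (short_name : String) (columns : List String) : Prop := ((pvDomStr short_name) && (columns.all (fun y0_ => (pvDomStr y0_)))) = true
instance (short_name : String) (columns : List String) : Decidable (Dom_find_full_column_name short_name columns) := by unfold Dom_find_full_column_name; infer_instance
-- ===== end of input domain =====

-- B replaces A's membership test plus two list-comprehension passes by a single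
-- loop over `columns` that records the exact hit and the first match of each
-- pattern, resolving the priority after the loop (objective: alternative).

-- ===== PORT A =====
def find_full_column_name (short_name : String) (columns : List String) : Option String :=
  if short_name ∈ columns then some short_name
  else
    match columns.filter (fun c => PySem.Str.startswith c (short_name ++ " (") && !(PySem.Str.isIn "(ENSG" c)) with
    | c :: _ => some c
    | [] =>
      match columns.filter (fun c => PySem.Str.startswith c (short_name ++ " (ENSG")) with
      | c :: _ => some c
      | [] => none

-- ===== PORT B =====
def find_full_column_name_alt (short_name : String) (columns : List String) : Option String :=
  let pref := short_name ++ " ("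
  let prefEnsg := short_name ++ " (ENSG"
  let res := columns.foldl
    (fun (st : Bool × Option String × Option String) c =>
      let exact := if c == short_name then true else st.1
      let fe := if st.2.1.isNone && (PySem.Str.startswith c pref && !(PySem.Str.isIn "(ENSG" c)) then some c else st.2.1
      let fg := if st.2.2.isNone && PySem.Str.startswith c prefEnsg then some c else st.2.2
      (exact, fe, fg))
    (false, none, none)
  if res.1 then some short_name
  else match res.2.1 with
    | some c => some c
    | none => res.2.2

-- ===== PRECONDITION & SPEC =====
def Spec_find_full_column_name (short_name : String) (columns : List String) (out : Option String) : Prop := out = find_full_column_name_alt short_name columns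
instance (short_name : String) (columns : List String) (out : Option String) : Decidable (Spec_find_full_column_name short_name columns out) := by unfold Spec_find_full_column_name; infer_instance

-- ===== CLAIM (what is proved, stated in full; the proofs are below) =====
def Claim_equal_find_full_column_name : Prop := ∀ (short_name : String) (columns : List String), Dom_find_full_column_name short_name columns → Spec_find_full_column_name short_name columns (find_full_column_name short_name columns)

-- ===== LEMMAS AND PROOFS =====

/-- B's single loop computes the membership bit and the first match of each predicate. -/
theorem pv_loop_spec (sn : String) (p q : String → Bool) :
    ∀ (l : List String) (b : Bool) (o1 o2 : Option String),
    l.foldl (fun (st : Bool × Option String × Option String) c =>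
        (if c == sn then true else st.1,
         if st.2.1.isNone && p c then some c else st.2.1,
         if st.2.2.isNone && q c then some c else st.2.2)) (b, o1, o2)
      = (b || l.contains sn, o1.or (l.find? p), o2.or (l.find? q)) := by
  intro l
  induction l with
  | nil => intro b o1 o2; simp
  | cons c t ih =>
    intro b o1 o2
    simp only [List.foldl_cons, ih, List.contains_cons, List.find?_cons]
    by_cases hc : c == sn
    · have hc' : sn = c := (eq_of_beq hc).symm
      cases o1 <;> cases o2 <;> by_cases hp : p c <;> by_cases hq : q c <;>
        simp [hp, hq, hc']
    · have hb : (sn == c) = false := beq_eq_false_iff_ne.mpr fun h => hc (by simp [h])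
      cases o1 <;> cases o2 <;> by_cases hp : p c <;> by_cases hq : q c <;>
        simp [hc, hp, hq, hb]

theorem pv_find?_eq_head?_filter (p : String → Bool) :
    ∀ (l : List String), l.find? p = (l.filter p).head? := by
  intro l
  induction l with
  | nil => rfl
  | cons c t ih =>
    cases hp : p c
    · rw [List.find?_cons_of_neg (h := by simp [hp]), List.filter_cons_of_neg (by simp [hp]), ih]
    · rw [List.find?_cons_of_pos (h := hp), List.filter_cons_of_pos hp, List.head?_cons]

theorem pv_match_head (l : List String) (X : Option String) :
    (match l with | c :: _ => some c | [] => X) = l.head?.or X := by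
  cases l <;> rfl

theorem pv_match_or (o o2 : Option String) :
    (match o with | some c => some c | none => o2) = o.or o2 := by
  cases o <;> rfl

-- ===== VERDICT (by name: the statement is the Claim_ definition above) =====
theorem find_full_column_name_spec : Claim_equal_find_full_column_name := by
  intro short_name columns _
  unfold Spec_find_full_column_name find_full_column_name find_full_column_name_alt
  simp only [pv_loop_spec, Bool.false_or, Option.none_or, pv_match_head, pv_match_or,
             pv_find?_eq_head?_filter, List.contains_eq_mem, Option.or_none]
  by_cases hmem : short_name ∈ columns <;> simp [hmem]
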